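-- pv_equiv track=rewrite | github.com/MalongSuper/Python-Programming---Optimization | ProjectManagementProblemEarliestTime.py | calculate_earliest_start
-- ===== SOURCE A (Python) =====
-- def calculate_earliest_start(d):  # Calculate the earliest start for each task
--     # Initialize the earliest start time for each task as 0
--     earliest_start = {i: 0 for i in range(len(d))}
--     # Process tasks in topological order
--     for task in range(len(d)):
--         duration, predecessors = d[task][1], d[task][2]
--         earliest_finish_time = earliest_start[task] + duration
--         # Update the earliest start time for all tasks dependent on this task
--         for successor in range(len(d)):
--             if task in d[successor][2]:  # If the task is a predecessor of successor
--                 # Ex: Task 4 is performed after Task 1, Task 2, Task 3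
--                 # By the time you finish these tasks, you will reach day 9
--                 # As Task 1 takes until day 9 to complete after Task 0
--                 # Therefore, Task 4 starts from day 9
--                 earliest_start[successor] = max(earliest_start[successor], earliest_finish_time)
--     return earliest_start
-- ===== SOURCE B (Python) =====
-- def calculate_earliest_start(d):  # Calculate the earliest start for each task
--     n = len(d)
--     # Build successor lists once (reverse adjacency), instead of rescanning
--     # every task's predecessor list for every task.
--     succ = [[] for _ in range(n)]
--     for j in range(n):
--         for p in dict.fromkeys(d[j][2]):  # distinct predecessors, in order
--             if 0 <= p < n:
--                 succ[p].append(j)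
--     es = [0] * n
--     for t in range(n):
--         f = es[t] + d[t][1]
--         for j in succ[t]:
--             es[j] = max(es[j], f)
--     return {i: es[i] for i in range(n)}
-- ===== Notes on version B (the rewrite author's own statement) =====
-- stated objective: faster
-- what changed: Instead of rescanning every task's predecessor list for every task (a nested O(n^2) scan with an O(P) membership test inside), B builds a reverse-adjacency successor table once and then relaxes each dependency edge exactly once in the same index order, on a plain array instead of a dict.
import Mathlib
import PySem

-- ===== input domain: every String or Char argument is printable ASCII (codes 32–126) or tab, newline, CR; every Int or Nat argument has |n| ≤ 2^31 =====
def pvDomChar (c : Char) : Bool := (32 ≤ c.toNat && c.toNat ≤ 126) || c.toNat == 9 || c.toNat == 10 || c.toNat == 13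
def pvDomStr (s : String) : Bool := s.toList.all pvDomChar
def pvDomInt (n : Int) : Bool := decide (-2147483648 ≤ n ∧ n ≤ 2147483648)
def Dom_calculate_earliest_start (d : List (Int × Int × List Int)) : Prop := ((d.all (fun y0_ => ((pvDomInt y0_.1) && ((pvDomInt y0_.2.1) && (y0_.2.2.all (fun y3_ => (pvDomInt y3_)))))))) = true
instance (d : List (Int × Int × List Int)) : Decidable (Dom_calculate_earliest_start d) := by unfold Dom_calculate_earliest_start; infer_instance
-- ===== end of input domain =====

-- B replaces A's rescan of every task's predecessor list for every task by a
-- reverse-adjacency (successor-list) table built once, then relaxes each edge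
-- exactly once in the same index order: O(n + E) instead of O(n^2 * P).

-- ===== PORT A =====
def calculate_earliest_start (d : List (Int × Int × List Int)) : List (Int × Int) :=
  -- earliest_start = {i: 0 for i in range(len(d))}
  let n : Int := d.length
  let es0 : PySem.Dict Int Int :=
    (PySem.List.pyRange 0 n 1).foldl (fun acc i => acc.insert i 0) PySem.Dict.empty
  -- for task in range(len(d)): …
  let es :=
    (PySem.List.pyRange 0 n 1).foldl (fun es task =>
      let duration := (PySem.List.pyGetD d task (0, 0, [])).2.1
      let eft := es.getD task 0 + duration
      -- for successor in range(len(d)): if task in d[successor][2]: …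
      (PySem.List.pyRange 0 n 1).foldl (fun es successor =>
        if task ∈ (PySem.List.pyGetD d successor (0, 0, [])).2.2 then
          es.insert successor (max (es.getD successor 0) eft)
        else es) es) es0
  es.items

-- ===== PORT B =====
def calculate_earliest_start_alt (d : List (Int × Int × List Int)) : List (Int × Int) :=
  let n := d.length
  -- succ = [[] for _ in range(n)]; for j in range(n): for p in dict.fromkeys(d[j][2]): …
  let succ : List (List Nat) :=
    (List.range n).foldl (fun acc j =>
      (PySem.List.dedup (d.getD j (0, 0, [])).2.2).foldl (fun acc p =>
        if 0 ≤ p ∧ p < (n : Int) then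
          acc.set p.toNat (acc.getD p.toNat [] ++ [j])
        else acc) acc) (List.replicate n [])
  -- es = [0] * n; for t in range(n): f = es[t] + d[t][1]; for j in succ[t]: es[j] = max(es[j], f)
  let es : List Int :=
    (List.range n).foldl (fun es t =>
      let f := es.getD t 0 + (d.getD t (0, 0, [])).2.1
      (succ.getD t []).foldl (fun es j => es.set j (max (es.getD j 0) f)) es)
      (List.replicate n 0)
  -- return {i: es[i] for i in range(n)}
  (List.range n).map (fun (i : Nat) => ((i : Int), es.getD i 0))

-- ===== PRECONDITION & SPEC =====
def Spec_calculate_earliest_start (d : List (Int × Int × List Int)) (out : List (Int × Int)) : Prop := out = calculate_earliest_start_alt d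
instance (d : List (Int × Int × List Int)) (out : List (Int × Int)) : Decidable (Spec_calculate_earliest_start d out) := by unfold Spec_calculate_earliest_start; infer_instance

-- ===== CLAIM (what is proved, stated in full; the proofs are below) =====
def Claim_equal_calculate_earliest_start : Prop := ∀ (d : List (Int × Int × List Int)), Dom_calculate_earliest_start d → Spec_calculate_earliest_start d (calculate_earliest_start d)

-- ===== LEMMAS AND PROOFS =====

-- predecessors / duration of task j (total accessors used only by the proofs)
def pvPreds (d : List (Int × Int × List Int)) (j : Nat) : List Int := (d.getD j (0, 0, [])).2.2
def pvDur (d : List (Int × Int × List Int)) (j : Nat) : Int := (d.getD j (0, 0, [])).2.1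

-- the common mathematical core: index-order relaxation on a plain list state
def pvStep (d : List (Int × Int × List Int)) (es : List Int) (t : Nat) : List Int :=
  let f := es.getD t 0 + pvDur d t
  (List.range d.length).foldl (fun es j =>
    if (t : Int) ∈ pvPreds d j then es.set j (max (es.getD j 0) f) else es) es

def pvFinal (d : List (Int × Int × List Int)) : List Int :=
  (List.range d.length).foldl (pvStep d) (List.replicate d.length 0)

theorem foldl_rel {α β γ : Type} (R : α → β → Prop) (l : List γ) (f : α → γ → α) (g : β → γ → β)
    (h : ∀ a b c, c ∈ l → R a b → R (f a c) (g b c)) :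
    ∀ a b, R a b → R (l.foldl f a) (l.foldl g b) := by
  induction l with
  | nil => intro a b hab; exact hab
  | cons x xs ih =>
    intro a b hab
    exact ih (fun a b c hc => h a b c (List.mem_cons_of_mem _ hc))
      _ _ (h a b x (List.mem_cons_self) hab)

theorem foldl_filter {α γ : Type} (l : List γ) (p : γ → Bool) (f : α → γ → α) (a : α) :
    l.foldl (fun s x => if p x then f s x else s) a = (l.filter p).foldl f a := by
  induction l generalizing a with
  | nil => rfl
  | cons x xs ih =>
    by_cases h : p x <;> simp [h, ih]

-- intermediate: the successor-table insertion step of B, and its characterization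
def pvIns (n j : Nat) (acc : List (List Nat)) (p : Int) : List (List Nat) :=
  if 0 ≤ p ∧ p < (n : Int) then acc.set p.toNat (acc.getD p.toNat [] ++ [j]) else acc

theorem pvIns_length (n j : Nat) (acc : List (List Nat)) (p : Int) :
    (pvIns n j acc p).length = acc.length := by
  unfold pvIns; split <;> simp

theorem foldl_pvIns_length (n j : Nat) (l : List Int) (acc : List (List Nat)) :
    (l.foldl (pvIns n j) acc).length = acc.length := by
  induction l generalizing acc with
  | nil => rfl
  | cons p l ih => simp [List.foldl_cons, ih, pvIns_length]

theorem pvIns_getD_ne (n j t : Nat) (acc : List (List Nat)) (p : Int) (hp : p ≠ (t : Int)) :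
    (pvIns n j acc p).getD t [] = acc.getD t [] := by
  unfold pvIns
  split
  · rename_i hg
    have hne : p.toNat ≠ t := by
      intro h
      exact hp (by omega)
    simp [List.getD_eq_getElem?_getD, List.getElem?_set_ne hne]
  · rfl

theorem foldl_pvIns_getD_notmem (n j t : Nat) (l : List Int) (acc : List (List Nat))
    (h : (t : Int) ∉ l) :
    (l.foldl (pvIns n j) acc).getD t [] = acc.getD t [] := by
  induction l generalizing acc with
  | nil => rfl
  | cons p l ih =>
    simp only [List.mem_cons, not_or] at h
    rw [List.foldl_cons, ih _ h.2, pvIns_getD_ne n j t acc p (fun hp => h.1 hp.symm)]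

theorem foldl_pvIns_getD (n j t : Nat) (l : List Int) (acc : List (List Nat))
    (hl : l.Nodup) (htn : t < n) (hta : t < acc.length) :
    (l.foldl (pvIns n j) acc).getD t [] =
      acc.getD t [] ++ (if (t : Int) ∈ l then [j] else []) := by
  induction l generalizing acc with
  | nil => simp
  | cons p l ih =>
    rw [List.foldl_cons]
    by_cases hp : p = (t : Int)
    · subst hp
      have hmem : ((t : Int) : Int) ∈ (t : Int) :: l := List.mem_cons_self
      have hnot : (t : Int) ∉ l := (List.nodup_cons.mp hl).1
      have hguard : 0 ≤ ((t : Int)) ∧ ((t : Int)) < (n : Int) := by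
        constructor <;> omega
      have hstep : pvIns n j acc (t : Int) = acc.set t (acc.getD t [] ++ [j]) := by
        unfold pvIns; rw [if_pos hguard]; simp
      rw [hstep, foldl_pvIns_getD_notmem n j t l _ hnot, if_pos hmem]
      rw [List.getD_eq_getElem?_getD, List.getElem?_set_self hta]
      rfl
    · have hlen : t < (pvIns n j acc p).length := by rw [pvIns_length]; exact hta
      rw [ih (pvIns n j acc p) (List.nodup_cons.mp hl).2 hlen,
        pvIns_getD_ne n j t acc p hp]
      have hiff : ((t : Int) ∈ p :: l) ↔ ((t : Int) ∈ l) := by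
        constructor
        · intro h
          rcases List.mem_cons.mp h with h | h
          · exact absurd h.symm hp
          · exact h
        · exact List.mem_cons_of_mem _
      simp [hiff]

-- B's outer building loop fills slot t with exactly the successors of t, in index order
theorem pvBuild_getD (d : List (Int × Int × List Int)) (n : Nat) (L : List Nat)
    (acc : List (List Nat)) (t : Nat) (htn : t < n) (hta : t < acc.length) :
    (L.foldl (fun acc j => (PySem.List.dedup (d.getD j (0, 0, [])).2.2).foldl (pvIns n j) acc) acc).getD t []
      = acc.getD t [] ++ L.filter (fun j => decide ((t : Int) ∈ pvPreds d j)) := by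
  induction L generalizing acc with
  | nil => simp
  | cons j L ih =>
    rw [List.foldl_cons, ih _ (by rw [foldl_pvIns_length]; exact hta),
      foldl_pvIns_getD n j t _ acc (PySem.List.nodup_dedup _) htn hta]
    rw [List.filter_cons]
    by_cases hmem : (t : Int) ∈ pvPreds d j
    · have h1 : (t : Int) ∈ PySem.List.dedup (d.getD j (0, 0, [])).2.2 := by
        rw [PySem.List.mem_dedup]; exact hmem
      rw [if_pos h1, if_pos (by simpa using hmem)]
      simp
    · have h1 : (t : Int) ∉ PySem.List.dedup (d.getD j (0, 0, [])).2.2 := by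
        rw [PySem.List.mem_dedup]; exact hmem
      rw [if_neg h1, if_neg (by simpa using hmem)]
      simp

-- the relation carried between A's dict state and the plain list state
def pvRel (n : Nat) (dd : PySem.Dict Int Int) (es : List Int) : Prop :=
  es.length = n ∧ dd.items = (List.range n).map (fun (i : Nat) => ((i : Int), es.getD i 0))

theorem pvRel_keys (n : Nat) (dd : PySem.Dict Int Int) (es : List Int)
    (h : pvRel n dd es) : dd.keys = (List.range n).map (fun (i : Nat) => (i : Int)) := by
  show dd.items.map (·.1) = _
  rw [h.2, List.map_map]
  rfl

theorem pvRel_nodup_keys (n : Nat) (dd : PySem.Dict Int Int) (es : List Int)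
    (h : pvRel n dd es) : dd.keys.Nodup := by
  rw [pvRel_keys n dd es h]
  exact (List.nodup_range).map (fun a b hab => by exact_mod_cast hab)

theorem pvRel_getD (n : Nat) (dd : PySem.Dict Int Int) (es : List Int)
    (h : pvRel n dd es) (k : Nat) (hk : k < n) :
    dd.getD (k : Int) 0 = es.getD k 0 := by
  have hmem : ((k : Int), es.getD k 0) ∈ dd.items := by
    rw [h.2]
    exact List.mem_map.mpr ⟨k, List.mem_range.mpr hk, rfl⟩
  exact PySem.Dict.getD_of_mem_items dd hmem (pvRel_nodup_keys n dd es h) 0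

theorem pvRel_insert (n : Nat) (dd : PySem.Dict Int Int) (es : List Int)
    (h : pvRel n dd es) (k : Nat) (hk : k < n) (v : Int) :
    pvRel n (dd.insert (k : Int) v) (es.set k v) := by
  constructor
  · rw [List.length_set]; exact h.1
  · have hc : dd.contains (k : Int) = true := by
      rw [PySem.Dict.contains_iff_mem_keys, pvRel_keys n dd es h]
      exact List.mem_map.mpr ⟨k, List.mem_range.mpr hk, rfl⟩
    rw [PySem.Dict.items_insert_of_contains dd v hc, h.2, List.map_map]
    apply List.map_congr_left
    intro i hi
    have hi' : i < n := List.mem_range.mp hi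
    by_cases hik : i = k
    · subst hik
      simp [List.getD_eq_getElem?_getD, h.1, hi']
    · simp [List.getD_eq_getElem?_getD,
        List.getElem?_set_ne (fun hh => hik hh.symm), hik]

-- A's folds compute, through the dict, exactly the list-state relaxation pvFinal
theorem pvA_eq (d : List (Int × Int × List Int)) :
    calculate_earliest_start d
      = (List.range d.length).map (fun (i : Nat) => ((i : Int), (pvFinal d).getD i 0)) := by
  unfold calculate_earliest_start
  simp only [PySem.List.pyRange_zero_natCast, List.foldl_map, PySem.List.pyGetD_natCast]
  have hinit : pvRel d.length
      ((List.range d.length).foldl (fun acc (i : Nat) => acc.insert (i : Int) 0) PySem.Dict.empty)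
      (List.replicate d.length 0) := by
    constructor
    · simp
    · rw [PySem.Dict.items_foldl_insert_fresh (List.range d.length)
        (fun (i : Nat) => (i : Int)) (fun _ => 0) PySem.Dict.empty
        (fun a _ => PySem.Dict.contains_empty _)
        ((List.nodup_range).map (fun a b hab => by exact_mod_cast hab))]
    
      apply List.map_congr_left
      intro i hi
      simp [List.getD_eq_getElem?_getD, List.mem_range.mp hi]
  have hmain := foldl_rel (pvRel d.length) (List.range d.length)
    (fun es (task : Nat) =>
      (List.range d.length).foldl (fun es2 (successor : Nat) =>
        if (task : Int) ∈ (d.getD successor (0, 0, [])).2.2 then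
          es2.insert (successor : Int) (max (es2.getD (successor : Int) 0)
            (es.getD (task : Int) 0 + (d.getD task (0, 0, [])).2.1))
        else es2) es)
    (pvStep d)
    (by
      intro dd es k hk hrel
      have hkn : k < d.length := List.mem_range.mp hk
      have hf : dd.getD (k : Int) 0 + (d.getD k (0, 0, [])).2.1
          = es.getD k 0 + pvDur d k := by
        rw [pvRel_getD _ _ _ hrel k hkn]; rfl
      show pvRel d.length
        ((List.range d.length).foldl (fun es2 (successor : Nat) =>
          if (k : Int) ∈ (d.getD successor (0, 0, [])).2.2 then
            es2.insert (successor : Int) (max (es2.getD (successor : Int) 0)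
              (dd.getD (k : Int) 0 + (d.getD k (0, 0, [])).2.1))
          else es2) dd)
        ((List.range d.length).foldl (fun es2 (j : Nat) =>
          if (k : Int) ∈ pvPreds d j then
            es2.set j (max (es2.getD j 0) (es.getD k 0 + pvDur d k))
          else es2) es)
      rw [hf]
      refine foldl_rel (pvRel d.length) (List.range d.length) _ _ ?_ dd es hrel
      intro dd2 es2 k2 hk2 hrel2
      have hk2n : k2 < d.length := List.mem_range.mp hk2
      by_cases hc : (k : Int) ∈ pvPreds d k2
      · have hc' : (k : Int) ∈ (d.getD k2 (0, 0, [])).2.2 := hc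
        rw [if_pos hc', if_pos hc, pvRel_getD _ _ _ hrel2 k2 hk2n]
        exact pvRel_insert _ _ _ hrel2 k2 hk2n _
      · have hc' : (k : Int) ∉ (d.getD k2 (0, 0, [])).2.2 := hc
        rw [if_neg hc', if_neg hc]
        exact hrel2)
    _ _ hinit
  exact hmain.2

-- B's array relaxation over the successor table is the same pvFinal
theorem pvB_eq (d : List (Int × Int × List Int)) :
    calculate_earliest_start_alt d
      = (List.range d.length).map (fun (i : Nat) => ((i : Int), (pvFinal d).getD i 0)) := by
  simp only [calculate_earliest_start_alt]
  have hsucc : ∀ t < d.length,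
      ((List.range d.length).foldl (fun acc j =>
          (PySem.List.dedup (d.getD j (0, 0, [])).2.2).foldl (pvIns d.length j) acc)
          (List.replicate d.length [])).getD t []
        = (List.range d.length).filter (fun j => decide ((t : Int) ∈ pvPreds d j)) := by
    intro t ht
    rw [pvBuild_getD d d.length (List.range d.length) _ t ht (by simp [ht])]
    simp [List.getD_eq_getElem?_getD, ht]
  have hes : (List.range d.length).foldl (fun es t =>
        (((List.range d.length).foldl (fun acc j =>
            (PySem.List.dedup (d.getD j (0, 0, [])).2.2).foldl (fun acc p =>
              if 0 ≤ p ∧ p < (d.length : Int) then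
                acc.set p.toNat (acc.getD p.toNat [] ++ [j])
              else acc) acc)
            (List.replicate d.length [])).getD t []).foldl
          (fun es2 j => es2.set j (max (es2.getD j 0) (es.getD t 0 + (d.getD t (0, 0, [])).2.1))) es)
      (List.replicate d.length 0) = pvFinal d := by
    show (List.range d.length).foldl (fun es t =>
        (((List.range d.length).foldl (fun acc j =>
            (PySem.List.dedup (d.getD j (0, 0, [])).2.2).foldl (pvIns d.length j) acc)
            (List.replicate d.length [])).getD t []).foldl
          (fun es2 j => es2.set j (max (es2.getD j 0) (es.getD t 0 + (d.getD t (0, 0, [])).2.1))) es)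
      (List.replicate d.length 0) = pvFinal d
    unfold pvFinal
    apply PySem.List.foldl_congr_mem
    intro es t ht
    rw [hsucc t (List.mem_range.mp ht)]
    unfold pvStep pvDur pvPreds
    rw [← foldl_filter]
    simp
  rw [hes]

-- ===== VERDICT (by name: the statement is the Claim_ definition above) =====
theorem calculate_earliest_start_spec : Claim_equal_calculate_earliest_start := by
  intro d _
  unfold Spec_calculate_earliest_start
  rw [pvA_eq, pvB_eq]
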